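-- pv_equiv track=rewrite | github.com/TJUNLP/CCKScner | Evaluate.py | count_sentence_triple_num
-- ===== SOURCE A (Python) =====
-- def count_sentence_triple_num(ptag, ttag):
--     # transfer the predicted tag sequence to triple index
--
--     predict_rmpair = tag_to_triple_index(ptag)
--     right_rmpair = tag_to_triple_index(ttag)
--     predict_right_num = 0  # the right number of predicted triple
--     predict_num = 0  # the number of predicted triples
--     right_num = 0
--     for type in predict_rmpair:
--         eelist = predict_rmpair[type]
--         e1 = eelist[0]
--         e2 = eelist[1]
--         predict_num += min(len(e1), len(e2))
--
--         if right_rmpair.__contains__(type):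
--             reelist = right_rmpair[type]
--             re1 = reelist[0]
--             re2 = reelist[1]
--
--             for i in range(0, min(min(len(e1), len(e2)), min(len(re1), len(re2)))):
--                 if e1[i][0] == re1[i][0] and e1[i][1] == re1[i][1] \
--                         and e2[i][0] == re2[i][0] and e2[i][1] == re2[i][1]:
--                     predict_right_num += 1
--
--     for type in right_rmpair:
--         eelist = right_rmpair[type]
--         e1 = eelist[0]
--         e2 = eelist[1]
--         right_num += min(len(e1), len(e2))
--     return predict_right_num, predict_num, right_num
--
-- def tag_to_triple_index(ptag):
--     rmpair = {}
--     for i in range(0, len(ptag)):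
--         tag = ptag[i]
--         if not tag.__eq__("O") and not tag.__eq__(""):
--             type_e = tag.split("__")
--             if not rmpair.__contains__(type_e[0]):
--                 eelist = []
--                 e1 = []
--                 e2 = []
--                 if type_e[1].__contains__("1"):
--                     if type_e[1].__contains__("S"):
--                         e1.append((i, i + 1))
--                     elif type_e[1].__contains__("B"):
--                         j = i + 1
--                         while j < len(ptag):
--                             if ptag[j].__contains__("1") and \
--                                     (ptag[j].__contains__("I") or ptag[j].__contains__("L")):
--                                 j += 1
--                             else:
--                                 break
--                         e1.append((i, j))
--                 elif type_e[1].__contains__("2"):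
--                     if type_e[1].__contains__("S"):
--                         e2.append((i, i + 1))
--                     elif type_e[1].__contains__("B"):
--                         j = i + 1
--                         while j < len(ptag):
--                             if ptag[j].__contains__("2") and \
--                                     (ptag[j].__contains__("I") or ptag[j].__contains__("L")):
--                                 j += 1
--                             else:
--                                 break
--                         e2.append((i, j))
--                 eelist.append(e1)
--                 eelist.append(e2)
--                 rmpair[type_e[0]] = eelist
--             else:
--                 eelist = rmpair[type_e[0]]
--                 e1 = eelist[0]
--                 e2 = eelist[1]
--                 if type_e[1].__contains__("1"):
--                     if type_e[1].__contains__("S"):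
--                         e1.append((i, i + 1))
--                     elif type_e[1].__contains__("B"):
--                         j = i + 1
--                         while j < len(ptag):
--                             if ptag[j].__contains__("1") and \
--                                     (ptag[j].__contains__("I") or ptag[j].__contains__("L")):
--                                 j += 1
--                             else:
--                                 break
--                         e1.append((i, j))
--                 elif type_e[1].__contains__("2"):
--                     if type_e[1].__contains__("S"):
--                         e2.append((i, i + 1))
--                     elif type_e[1].__contains__("B"):
--                         j = i + 1
--                         while j < len(ptag):
--                             if ptag[j].__contains__("2") and \
--                                     (ptag[j].__contains__("I") or ptag[j].__contains__("L")):
--                                 j += 1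
--                             else:
--                                 break
--                         e2.append((i, j))
--                 eelist[0] = e1
--                 eelist[1] = e2
--                 rmpair[type_e[0]] = eelist
--     return rmpair
-- ===== SOURCE B (Python) =====
-- def _cont(t, d):
--     # role-d continuation test, exactly A's raw-substring rule
--     return d in t and ('I' in t or 'L' in t)
--
--
-- def _ends(tags, d):
--     # ends[j] = first index k >= j with not _cont(tags[k], d), else len(tags);
--     # built right-to-left in one pass, then reversed.
--     n = len(tags)
--     res = [n]
--     for i in range(n - 1, -1, -1):
--         res.append(res[-1] if _cont(tags[i], d) else i)
--     res.reverse()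
--     return res
--
--
-- def _parse(tags):
--     end1 = _ends(tags, '1')
--     end2 = _ends(tags, '2')
--     rmpair = {}
--     for i in range(len(tags)):
--         tag = tags[i]
--         if tag == "O" or tag == "":
--             continue
--         parts = tag.split("__")
--         e1, e2 = rmpair.setdefault(parts[0], ([], []))
--         suf = parts[1]
--         if '1' in suf:
--             if 'S' in suf:
--                 e1.append((i, i + 1))
--             elif 'B' in suf:
--                 e1.append((i, end1[i + 1]))
--         elif '2' in suf:
--             if 'S' in suf:
--                 e2.append((i, i + 1))
--             elif 'B' in suf:
--                 e2.append((i, end2[i + 1]))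
--     return rmpair
--
--
-- def count_sentence_triple_num(ptag, ttag):
--     predict = _parse(ptag)
--     right = _parse(ttag)
--     predict_right_num = sum(
--         sum(p == q for p, q in zip(zip(e1, e2), zip(re1, re2)))
--         for ty, (e1, e2) in predict.items()
--         if ty in right
--         for re1, re2 in [right[ty]]
--     )
--     predict_num = sum(min(len(e1), len(e2)) for e1, e2 in predict.values())
--     right_num = sum(min(len(e1), len(e2)) for e1, e2 in right.values())
--     return predict_right_num, predict_num, right_num
-- ===== Notes on version B (the rewrite author's own statement) =====
-- stated objective: alternative
-- what changed: The parser's per-B-tag forward while-rescans are replaced by two run-end tables precomputed in one backward pass each (span end = table lookup, O(n) total instead of O(n^2) worst case), the duplicated dict branches by a single setdefault path, and the index-wise match-counting loop by a sum over zipped span lists; the counting totals become sums over items/values.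
import Mathlib
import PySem

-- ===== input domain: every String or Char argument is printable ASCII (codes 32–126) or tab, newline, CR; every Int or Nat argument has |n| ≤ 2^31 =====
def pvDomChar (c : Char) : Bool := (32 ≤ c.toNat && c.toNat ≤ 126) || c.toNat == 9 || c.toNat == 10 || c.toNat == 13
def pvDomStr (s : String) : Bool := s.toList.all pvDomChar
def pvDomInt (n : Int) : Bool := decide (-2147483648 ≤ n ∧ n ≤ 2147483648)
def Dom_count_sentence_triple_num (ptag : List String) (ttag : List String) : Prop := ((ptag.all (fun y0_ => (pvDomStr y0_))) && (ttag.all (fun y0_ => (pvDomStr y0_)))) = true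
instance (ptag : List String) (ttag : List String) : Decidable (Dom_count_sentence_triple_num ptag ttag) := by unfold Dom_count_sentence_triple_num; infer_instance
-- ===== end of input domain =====

-- B replaces A's per-B-tag forward rescans by two precomputed run-end tables (one
-- backward pass per role) and replaces the index-counting match loop by a zip count;
-- same return value on every input where A returns (objective: alternative).

-- ===== PORT A =====

-- t.split("__"): sep "__" ≠ "", so PySem.Str.split? is always `some` (exact)
def pvSplitTag (t : String) : List String := (PySem.Str.split? t "__").getD []

-- the inner `while j < len(ptag): if ptag[j] contains d and (I or L): j += 1 else break`
def pvScanA (tags : List String) (d : String) (j : Int) : Int :=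
  if h : j < (tags.length : Int) then
    let t := PySem.List.pyGetD tags j ""
    if PySem.Str.isIn d t && (PySem.Str.isIn "I" t || PySem.Str.isIn "L" t) then
      pvScanA tags d (j + 1)
    else j
  else j
termination_by ((tags.length : Int) - j).toNat
decreasing_by omega

-- the span-appending block A repeats verbatim in both dict branches
def pvUpdA (tags : List String) (i : Int) (suf : String)
    (e : List (Int × Int) × List (Int × Int)) : List (Int × Int) × List (Int × Int) :=
  if PySem.Str.isIn "1" suf then
    if PySem.Str.isIn "S" suf then (e.1 ++ [(i, i + 1)], e.2)
    else if PySem.Str.isIn "B" suf then (e.1 ++ [(i, pvScanA tags "1" (i + 1))], e.2)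
    else e
  else if PySem.Str.isIn "2" suf then
    if PySem.Str.isIn "S" suf then (e.1, e.2 ++ [(i, i + 1)])
    else if PySem.Str.isIn "B" suf then (e.1, e.2 ++ [(i, pvScanA tags "2" (i + 1))])
    else e
  else e

def tag_to_triple_index (ptag : List String) :
    PySem.Dict String (List (Int × Int) × List (Int × Int)) :=
  (PySem.List.pyRange 0 (PySem.List.len ptag)).foldl (fun rmpair i =>
    let tag := PySem.List.pyGetD ptag i ""
    if !(tag == "O") && !(tag == "") then
      let type_e := pvSplitTag tag
      let ty := PySem.List.pyGetD type_e 0 ""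
      let suf := PySem.List.pyGetD type_e 1 ""   -- Pre_ guarantees index 1 exists (else Python raises IndexError)
      if !(rmpair.contains ty) then
        rmpair.insert ty (pvUpdA ptag i suf ([], []))
      else
        rmpair.insert ty (pvUpdA ptag i suf (rmpair.getD ty ([], [])))
    else rmpair) PySem.Dict.empty

-- the `if right_rmpair contains type: for i in range(min(...)): if ...: predict_right_num += 1` block
def pvMatchCount (right : PySem.Dict String (List (Int × Int) × List (Int × Int)))
    (prn0 : Int) (p : String × (List (Int × Int) × List (Int × Int))) : Int :=
  if right.contains p.1 then
    let re := right.getD p.1 ([], [])   -- contains checked, so getD = Python right_rmpair[type]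
    (PySem.List.pyRange 0 (min (min (PySem.List.len p.2.1) (PySem.List.len p.2.2))
        (min (PySem.List.len re.1) (PySem.List.len re.2)))).foldl
      (fun prn i =>
        if (PySem.List.pyGetD p.2.1 i (0, 0)).1 == (PySem.List.pyGetD re.1 i (0, 0)).1 &&
           (PySem.List.pyGetD p.2.1 i (0, 0)).2 == (PySem.List.pyGetD re.1 i (0, 0)).2 &&
           (PySem.List.pyGetD p.2.2 i (0, 0)).1 == (PySem.List.pyGetD re.2 i (0, 0)).1 &&
           (PySem.List.pyGetD p.2.2 i (0, 0)).2 == (PySem.List.pyGetD re.2 i (0, 0)).2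
        then prn + 1 else prn) prn0
  else prn0

-- `predict_num += min(len(e1), len(e2))` (and the same statement in the right_num loop)
def pvAddMin (n : Int) (p : String × (List (Int × Int) × List (Int × Int))) : Int :=
  n + min (PySem.List.len p.2.1) (PySem.List.len p.2.2)

def count_sentence_triple_num (ptag : List String) (ttag : List String) : Int × Int × Int :=
  let predict_rmpair := tag_to_triple_index ptag
  let right_rmpair := tag_to_triple_index ttag
  -- `for type in d:` with `d[type]` lookups ported as iteration over d.items (keys are unique)
  let res := predict_rmpair.items.foldl
    (fun (acc : Int × Int) p => (pvMatchCount right_rmpair acc.1 p, pvAddMin acc.2 p)) (0, 0)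
  let right_num : Int := right_rmpair.items.foldl pvAddMin 0
  (res.1, res.2, right_num)

-- ===== PORT B =====

def pvCont (t d : String) : Bool :=
  PySem.Str.isIn d t && (PySem.Str.isIn "I" t || PySem.Str.isIn "L" t)

-- res[-1] is PySem.List.pyGetD res (-1) _ (negative index, exact)
def pvEnds (tags : List String) (d : String) : List Int :=
  let n := PySem.List.len tags
  let res := (PySem.List.pyRange (n - 1) (-1) (-1)).foldl
    (fun res i =>
      res ++ [if pvCont (PySem.List.pyGetD tags i "") d then PySem.List.pyGetD res (-1) 0 else i])
    [n]
  res.reverse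

def pvUpdB (i : Int) (suf : String) (k1 k2 : Int)
    (e : List (Int × Int) × List (Int × Int)) : List (Int × Int) × List (Int × Int) :=
  if PySem.Str.isIn "1" suf then
    (if PySem.Str.isIn "S" suf then e.1 ++ [(i, i + 1)]
     else if PySem.Str.isIn "B" suf then e.1 ++ [(i, k1)]
     else e.1, e.2)
  else if PySem.Str.isIn "2" suf then
    (e.1, if PySem.Str.isIn "S" suf then e.2 ++ [(i, i + 1)]
     else if PySem.Str.isIn "B" suf then e.2 ++ [(i, k2)]
     else e.2)
  else e

def pvParse (tags : List String) :
    PySem.Dict String (List (Int × Int) × List (Int × Int)) :=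
  let end1 := pvEnds tags "1"
  let end2 := pvEnds tags "2"
  (PySem.List.pyRange 0 (PySem.List.len tags)).foldl (fun rmpair i =>
    let tag := PySem.List.pyGetD tags i ""
    if tag == "O" || tag == "" then rmpair
    else
      let parts := pvSplitTag tag
      let ty := PySem.List.pyGetD parts 0 ""
      let suf := PySem.List.pyGetD parts 1 ""   -- Pre_ guarantees index 1 exists
      let rmpair := rmpair.setdefault ty ([], [])
      let e := rmpair.getD ty ([], [])
      rmpair.insert ty
        (pvUpdB i suf (PySem.List.pyGetD end1 (i + 1) 0) (PySem.List.pyGetD end2 (i + 1) 0) e))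
    PySem.Dict.empty

def count_sentence_triple_num_alt (ptag : List String) (ttag : List String) : Int × Int × Int :=
  let predict := pvParse ptag
  let right := pvParse ttag
  let prn : Int := (predict.items.map (fun p =>
      if right.contains p.1 then
        let q := right.getD p.1 ([], [])
        (((p.2.1.zip p.2.2).zip (q.1.zip q.2)).map
          (fun z => if z.1 == z.2 then (1 : Int) else 0)).sum
      else 0)).sum
  let pn : Int := (predict.values.map
      (fun e => min (PySem.List.len e.1) (PySem.List.len e.2))).sum
  let rn : Int := (right.values.map
      (fun e => min (PySem.List.len e.1) (PySem.List.len e.2))).sum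
  (prn, pn, rn)

-- ===== PRECONDITION & SPEC =====

-- Pre_ excludes exactly the inputs where Python A raises IndexError: a tag other than
-- "O" and "" that does not contain the separator "__" (tag.split("__")[1] is accessed).
def Pre_count_sentence_triple_num (ptag : List String) (ttag : List String) : Prop :=
  (∀ t ∈ ptag, t = "O" ∨ t = "" ∨ 2 ≤ (pvSplitTag t).length) ∧
  (∀ t ∈ ttag, t = "O" ∨ t = "" ∨ 2 ≤ (pvSplitTag t).length)
instance (ptag : List String) (ttag : List String) : Decidable (Pre_count_sentence_triple_num ptag ttag) := by
  unfold Pre_count_sentence_triple_num; infer_instance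

def pvWitness_count_sentence_triple_num : List String × List String :=
  (["PER__B1", "PER__I1", "O", "PER__S2"], ["PER__B1", "O", "", "PER__S2"])

def Spec_count_sentence_triple_num (ptag : List String) (ttag : List String) (out : Int × Int × Int) : Prop := out = count_sentence_triple_num_alt ptag ttag
instance (ptag : List String) (ttag : List String) (out : Int × Int × Int) : Decidable (Spec_count_sentence_triple_num ptag ttag out) := by unfold Spec_count_sentence_triple_num; infer_instance

-- ===== CLAIM (what is proved, stated in full; the proofs are below) =====
def Claim_equal_count_sentence_triple_num : Prop := ∀ (ptag : List String) (ttag : List String), Dom_count_sentence_triple_num ptag ttag → Pre_count_sentence_triple_num ptag ttag → Spec_count_sentence_triple_num ptag ttag (count_sentence_triple_num ptag ttag)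

-- ===== LEMMAS AND PROOFS =====


theorem pvGetD_append_neg_one {l : List Int} {x d : Int} :
    PySem.List.pyGetD (l ++ [x]) (-1) d = x := by
  simp [PySem.List.pyGetD, PySem.List.pyGet?, PySem.List.pyIdx?]

theorem pvScanA_of_len_le {tags : List String} {d : String} {j : Int}
    (h : (tags.length : Int) ≤ j) : pvScanA tags d j = j := by
  rw [pvScanA, dif_neg (not_lt.mpr h)]

theorem pvEndsAux (tags : List String) (d : String) (k : Nat) :
    ∀ (acc : List Int) (x : Int), k ≤ tags.length → x = pvScanA tags d k →
    (PySem.List.pyRange ((k : Int) - 1) (-1) (-1)).foldl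
      (fun res i => res ++ [if pvCont (PySem.List.pyGetD tags i "") d then PySem.List.pyGetD res (-1) 0 else i])
      (acc ++ [x])
    = acc ++ [x] ++ ((List.range k).reverse.map (fun (j : Nat) => pvScanA tags d (j : Int))) := by
  induction k with
  | zero =>
    intro acc x hk hx
    rw [show ((0:Nat) : Int) - 1 = -1 by norm_num, PySem.List.pyRange_neg_one_eq_nil le_rfl]
    simp
  | succ k ih =>
    intro acc x hk hx
    have hk' : (k : Int) < (tags.length : Int) := by exact_mod_cast hk
    have hx' : x = pvScanA tags d ((k:Int) + 1) := by
      rw [hx]; norm_cast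
    have hscan : pvScanA tags d (k:Int) =
        if pvCont (PySem.List.pyGetD tags (k:Int) "") d then pvScanA tags d ((k:Int)+1) else (k:Int) := by
      rw [pvScanA, dif_pos hk']; rfl
    rw [show ((k+1:Nat) : Int) - 1 = (k : Int) by push_cast; ring,
        PySem.List.pyRange_neg_one_cons (by omega : (-1:Int) < (k:Int))]
    rw [List.foldl_cons]
    have hstep : (acc ++ [x]) ++ [if pvCont (PySem.List.pyGetD tags (k:Int) "") d then PySem.List.pyGetD (acc ++ [x]) (-1) 0 else (k:Int)]
        = (acc ++ [x]) ++ [pvScanA tags d (k:Int)] := by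
      rw [pvGetD_append_neg_one, hscan, ← hx']
    rw [hstep, ih (acc ++ [x]) (pvScanA tags d (k:Int)) (by omega) rfl]
    simp [List.range_succ]

theorem pvEnds_eq (tags : List String) (d : String) :
    pvEnds tags d = (List.range (tags.length + 1)).map (fun (k : Nat) => pvScanA tags d (k : Int)) := by
  have := pvEndsAux tags d tags.length [] ((tags.length : Int)) le_rfl
    (by rw [pvScanA_of_len_le le_rfl])
  simp only [List.nil_append] at this
  simp only [pvEnds, PySem.List.len]
  rw [this]
  simp [List.range_succ, pvScanA_of_len_le]

theorem pvEnds_lookup (tags : List String) (d : String) {i : Int}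
    (h0 : 0 ≤ i) (h1 : i < (tags.length : Int)) :
    PySem.List.pyGetD (pvEnds tags d) (i + 1) 0 = pvScanA tags d (i + 1) := by
  rw [pvEnds_eq, PySem.List.pyGetD_of_nonneg _ _ (by omega)]
  rw [PySem.List.getD_map_range _ _ _ _ (by omega)]
  congr 1
  omega

theorem pvUpd_eq (tags : List String) {i : Int} (suf : String)
    (e : List (Int × Int) × List (Int × Int))
    (h0 : 0 ≤ i) (h1 : i < (tags.length : Int)) :
    pvUpdA tags i suf e =
      pvUpdB i suf (PySem.List.pyGetD (pvEnds tags "1") (i + 1) 0)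
        (PySem.List.pyGetD (pvEnds tags "2") (i + 1) 0) e := by
  rw [pvEnds_lookup tags "1" h0 h1, pvEnds_lookup tags "2" h0 h1]
  unfold pvUpdA pvUpdB
  split_ifs <;> rfl

theorem pvInsert_insert {κ ν : Type} [BEq κ] [LawfulBEq κ] (d : PySem.Dict κ ν) (k : κ) (v w : ν)
    (hc : d.contains k = false) : (d.insert k v).insert k w = d.insert k w := by
  obtain ⟨items⟩ := d
  simp only [PySem.Dict.contains] at hc
  simp only [PySem.Dict.insert, PySem.Dict.contains, hc]
  simp only [List.any_eq_false] at hc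
  simp [List.map_congr_left (fun p hp => by simp [hc p hp] : ∀ p ∈ items, (fun p => if p.1 == k then (k, w) else p) p = id p)]

theorem pvSetdefault_contains {κ ν : Type} [BEq κ] (d : PySem.Dict κ ν) (k : κ) (v : ν)
    (hc : d.contains k = true) : d.setdefault k v = d := by
  simp [PySem.Dict.setdefault, hc]

theorem pvSetdefault_not_contains {κ ν : Type} [BEq κ] (d : PySem.Dict κ ν) (k : κ) (v : ν)
    (hc : d.contains k = false) : d.setdefault k v = d.insert k v := by
  simp [PySem.Dict.setdefault, PySem.Dict.insert, hc]

theorem pvParse_eq (tags : List String) : tag_to_triple_index tags = pvParse tags := by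
  unfold tag_to_triple_index pvParse
  refine PySem.List.foldl_congr_mem _ _ _ _ ?_
  intro acc i hi
  rw [PySem.List.mem_pyRange_one] at hi
  have h0 : 0 ≤ i := hi.1
  have h1 : i < (tags.length : Int) := hi.2
  by_cases hO : PySem.List.pyGetD tags i "" = "O"
  · simp [hO]
  by_cases hE : PySem.List.pyGetD tags i "" = ""
  · simp [hE]
  have hO' : (PySem.List.pyGetD tags i "" == "O") = false := by simp [hO]
  have hE' : (PySem.List.pyGetD tags i "" == "") = false := by simp [hE]
  simp only [hO', hE', Bool.not_false, Bool.and_self, Bool.or_self, if_true]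
  rw [← pvUpd_eq tags _ _ h0 h1]
  by_cases hc : acc.contains (PySem.List.pyGetD (pvSplitTag (PySem.List.pyGetD tags i "")) 0 "") = true
  · simp only [hc, Bool.not_true, pvSetdefault_contains _ _ _ hc]
    simp
  · simp only [Bool.not_eq_true] at hc
    simp only [hc, Bool.not_false, if_true, pvSetdefault_not_contains _ _ _ hc]
    rw [pvInsert_insert _ _ _ _ hc]
    rw [PySem.Dict.getD_eq_get?_getD, PySem.Dict.get?_insert_self]
    simp

theorem pvInner_eq (e1 e2 re1 re2 : List (Int × Int)) (a : Int) :
    (PySem.List.pyRange 0 (min (min (PySem.List.len e1) (PySem.List.len e2))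
        (min (PySem.List.len re1) (PySem.List.len re2)))).foldl
      (fun prn i =>
        if (PySem.List.pyGetD e1 i (0, 0)).1 == (PySem.List.pyGetD re1 i (0, 0)).1 &&
           (PySem.List.pyGetD e1 i (0, 0)).2 == (PySem.List.pyGetD re1 i (0, 0)).2 &&
           (PySem.List.pyGetD e2 i (0, 0)).1 == (PySem.List.pyGetD re2 i (0, 0)).1 &&
           (PySem.List.pyGetD e2 i (0, 0)).2 == (PySem.List.pyGetD re2 i (0, 0)).2
        then prn + 1 else prn) a
    = a + (((e1.zip e2).zip (re1.zip re2)).map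
        (fun z => if z.1 == z.2 then (1 : Int) else 0)).sum := by
  have hM : min (min (PySem.List.len e1) (PySem.List.len e2))
      (min (PySem.List.len re1) (PySem.List.len re2))
      = PySem.List.len ((e1.zip e2).zip (re1.zip re2)) := by
    simp only [PySem.List.len, List.length_zip]
    push_cast
    omega
  rw [hM]
  rw [PySem.List.foldl_congr_mem _ _
    (fun prn j => if ((PySem.List.pyGetD ((e1.zip e2).zip (re1.zip re2)) j (((0,0),(0,0)),((0,0),(0,0)))).1
        == (PySem.List.pyGetD ((e1.zip e2).zip (re1.zip re2)) j (((0,0),(0,0)),((0,0),(0,0)))).2)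
      then prn + 1 else prn) _ ?_]
  · rw [PySem.List.foldl_pyRange_zero_pyGetD ((e1.zip e2).zip (re1.zip re2)) (((0,0),(0,0)),((0,0),(0,0)))
      (fun prn z => if z.1 == z.2 then prn + 1 else prn) a]
    rw [PySem.List.foldl_if_add_one
      (fun z : ((Int × Int) × (Int × Int)) × ((Int × Int) × (Int × Int)) => z.1 == z.2)]
    rw [PySem.List.sum_map_ite_one_zero
      (fun z : ((Int × Int) × (Int × Int)) × ((Int × Int) × (Int × Int)) => z.1 == z.2)]
  · intro acc j hj
    rw [PySem.List.mem_pyRange_one] at hj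
    simp only [PySem.List.len, List.length_zip] at hj
    have h0 : 0 ≤ j := hj.1
    have hL : j.toNat < ((e1.zip e2).zip (re1.zip re2)).length := by
      simp [List.length_zip]; omega
    have hzip : PySem.List.pyGetD ((e1.zip e2).zip (re1.zip re2)) j (((0,0),(0,0)),((0,0),(0,0)))
        = ((e1[j.toNat]'(by simp [List.length_zip] at hL; omega), e2[j.toNat]'(by simp [List.length_zip] at hL; omega)),
           (re1[j.toNat]'(by simp [List.length_zip] at hL; omega), re2[j.toNat]'(by simp [List.length_zip] at hL; omega))) := by
      rw [PySem.List.pyGetD_eq_getElem _ _ h0 (by omega)]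
      simp [List.getElem_zip]
    simp only []
    rw [hzip,
      PySem.List.pyGetD_eq_getElem e1 _ h0 (by simp [List.length_zip] at hL; omega),
      PySem.List.pyGetD_eq_getElem e2 _ h0 (by simp [List.length_zip] at hL; omega),
      PySem.List.pyGetD_eq_getElem re1 _ h0 (by simp [List.length_zip] at hL; omega),
      PySem.List.pyGetD_eq_getElem re2 _ h0 (by simp [List.length_zip] at hL; omega)]
    congr 1
    rw [Bool.eq_iff_iff]
    simp [beq_iff_eq, Prod.ext_iff]
    tauto

-- ===== VERDICT (by name: the statement is the Claim_ definition above) =====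
theorem count_sentence_triple_num_spec : Claim_equal_count_sentence_triple_num := by
  intro ptag ttag _ _
  unfold Spec_count_sentence_triple_num count_sentence_triple_num count_sentence_triple_num_alt
  simp only [pvParse_eq]
  rw [PySem.List.foldl_prod_mk (f := pvMatchCount (pvParse ttag)) (g := pvAddMin)]
  rw [show pvAddMin = (fun (a : Int) (p : String × (List (Int × Int) × List (Int × Int))) =>
        a + min (PySem.List.len p.2.1) (PySem.List.len p.2.2)) from rfl,
      PySem.List.foldl_add, PySem.List.foldl_add]
  have hcongr : ∀ (a : Int), ∀ p ∈ (pvParse ptag).items, pvMatchCount (pvParse ttag) a p =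
      a + (if (pvParse ttag).contains p.1 then
        (((p.2.1.zip p.2.2).zip (((pvParse ttag).getD p.1 ([], [])).1.zip ((pvParse ttag).getD p.1 ([], [])).2)).map
          (fun z => if z.1 == z.2 then (1 : Int) else 0)).sum
      else 0) := by
    intro a p _
    unfold pvMatchCount
    by_cases hc : (pvParse ttag).contains p.1 = true
    · simp only [hc, if_true]
      rw [pvInner_eq]
    · simp only [Bool.not_eq_true] at hc
      simp [hc]
  rw [PySem.List.foldl_congr_mem _ _ _ 0 hcongr]
  rw [PySem.List.foldl_add]
  simp [PySem.Dict.values, List.map_map, Function.comp_def]
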